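-- pv_equiv track=rewrite | github.com/sunilsoni/interview-notes-python | com/interview/2025/feb/visa/test1/solution.py | solution
-- ===== SOURCE A (Python) =====
-- def solution(matrix):
--     """
--     Finds the length of the longest diagonal segment that matches the pattern:
--     1, 2, 0, 2, 0, 2, 0, ...
--     and that finishes because the next diagonal step would be out-of-bounds
--     (i.e. the segment naturally ends at a border).
--
--     In a matrix larger than 1×1, we require that a valid segment contains at least 3 elements.
--     (A 1×1 matrix is a special case where the only cell is valid.)
--
--     Args:
--         matrix (list of list of int): 2D matrix with values 0, 1, or 2.
--
--     Returns:
--         int: The length of the longest valid diagonal segment, or 0 if none exists.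
--     """
--     if not matrix or not matrix[0]:
--         return 0
--
--     n = len(matrix)
--     m = len(matrix[0])
--
--     # Define the four possible diagonal directions: (dx, dy)
--     directions = [(1, 1), (1, -1), (-1, 1), (-1, -1)]
--
--     def in_bounds(i, j):
--         return 0 <= i < n and 0 <= j < m
--
--     # Given a position index in the segment, return the expected value.
--     def expected_value(pos):
--         if pos == 0:
--             return 1
--         # For positions >=1: odd positions should be 2 and even positions (other than 0) should be 0.
--         return 2 if pos % 2 == 1 else 0
--
--     max_length = 0
--
--     # For every cell that might be the start of a segment (it must contain 1)
--     for i in range(n):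
--         for j in range(m):
--             if matrix[i][j] != 1:
--                 continue  # only start where the cell equals 1
--
--             # Try each of the four diagonal directions
--             for dx, dy in directions:
--                 cur_i, cur_j = i, j
--                 seg_length = 1  # already matched the starting cell
--
--                 while True:
--                     next_i = cur_i + dx
--                     next_j = cur_j + dy
--                     if in_bounds(next_i, next_j):
--                         # We can continue – check if the next cell matches the expected pattern.
--                         exp = expected_value(seg_length)
--                         if matrix[next_i][next_j] != exp:
--                             # Mismatch encountered while still in bounds.
--                             # In that case we do not consider this segment at all.
--                             seg_length = 0
--                             break
--                         # Otherwise, the cell matches; update the current cell and extend the segment.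
--                         cur_i, cur_j = next_i, next_j
--                         seg_length += 1
--                     else:
--                         # Next cell is out-of-bounds: the segment "naturally" finishes at the border.
--                         # But accept it only if the last cell (cur_i, cur_j) is on a border.
--                         # And if the matrix is larger than 1x1, require that seg_length >= 3.
--                         if (cur_i == 0 or cur_i == n - 1 or cur_j == 0 or cur_j == m - 1):
--                             if (n == 1 and m == 1) or seg_length >= 3:
--                                 max_length = max(max_length, seg_length)
--                         break
--
--     return max_length
-- ===== SOURCE B (Python) =====
-- def solution(matrix):
--     """Alternative algorithm: one sweep per diagonal direction.  For each of the four
--     directions we walk every diagonal once, from its border-exit cell inward,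
--     carrying the lengths of the valid alternating (2,0,2,0,...) suffix runs
--     that reach the border (s2 = run expecting 2 first, s0 = expecting 0 first,
--     None = no valid run).  A start cell containing 1 then contributes 1 + s2."""
--     if not matrix or not matrix[0]:
--         return 0
--     n, m = len(matrix), len(matrix[0])
--     single = (n == 1 and m == 1)
--     best = 0
--     for dx, dy in ((1, 1), (1, -1), (-1, 1), (-1, -1)):
--         for bi in range(n):
--             for bj in range(m):
--                 if 0 <= bi + dx < n and 0 <= bj + dy < m:
--                     continue  # not the border-exit cell of its diagonal
--                 s2, s0 = 0, 0  # the step past (bi,bj) is out of bounds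
--                 i, j = bi, bj
--                 while 0 <= i < n and 0 <= j < m:
--                     v = matrix[i][j]
--                     if v == 1 and s2 is not None:
--                         cand = s2 + 1
--                         if cand >= 3 or single:
--                             best = max(best, cand)
--                     ns2 = s0 + 1 if (v == 2 and s0 is not None) else None
--                     ns0 = s2 + 1 if (v == 0 and s2 is not None) else None
--                     s2, s0 = ns2, ns0
--                     i -= dx
--                     j -= dy
--     return best
-- ===== Notes on version B (the rewrite author's own statement) =====
-- stated objective: alternative
-- what changed: Replaces the per-start-cell diagonal walk (A re-scans each diagonal once per 1-cell it contains) by one border-inward sweep per diagonal per direction that carries the two alternating suffix-run lengths, so each cell is visited a constant number of times per direction.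
import Mathlib
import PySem

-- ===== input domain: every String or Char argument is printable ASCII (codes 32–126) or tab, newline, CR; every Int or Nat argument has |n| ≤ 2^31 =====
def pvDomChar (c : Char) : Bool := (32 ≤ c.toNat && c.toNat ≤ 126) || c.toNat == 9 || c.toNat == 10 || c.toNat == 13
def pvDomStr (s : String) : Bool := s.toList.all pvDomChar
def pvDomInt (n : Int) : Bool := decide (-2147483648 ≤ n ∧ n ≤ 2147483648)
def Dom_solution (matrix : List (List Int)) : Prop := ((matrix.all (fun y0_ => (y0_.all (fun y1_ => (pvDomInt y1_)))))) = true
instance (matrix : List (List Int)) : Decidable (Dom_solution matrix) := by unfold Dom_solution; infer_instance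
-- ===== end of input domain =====

-- B replaces A's per-start-cell diagonal walks by one border-inward sweep per diagonal
-- per direction carrying the alternating suffix-run lengths (alternative algorithm).

-- shared trivial helpers: cell access (exact under Pre_, every access is in bounds) and the bounds test
def pvGet (matrix : List (List Int)) : Int → Int → Int :=
  fun i j => (matrix.getD i.toNat []).getD j.toNat 0

def pvInb (n m i j : Int) : Bool := decide (0 ≤ i ∧ i < n ∧ 0 ≤ j ∧ j < m)

-- ===== PORT A =====
def evA (pos : Int) : Int := if pos = 0 then 1 else if pos % 2 = 1 then 2 else 0

-- A's inner `while True` walk; fuel only makes the loop total (never reached with the fuel the port passes).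
-- Returns the accepted segment length, or 0 when A's loop breaks without updating max_length.
def walkA (g : Int → Int → Int) (n m dx dy : Int) : Nat → Int → Int → Int → Int
  | 0, _, _, _ => 0
  | fuel+1, ci, cj, seg =>
    if pvInb n m (ci+dx) (cj+dy) then
      if g (ci+dx) (cj+dy) ≠ evA seg then 0
      else walkA g n m dx dy fuel (ci+dx) (cj+dy) (seg+1)
    else
      if ci = 0 ∨ ci = n-1 ∨ cj = 0 ∨ cj = m-1 then
        if (n = 1 ∧ m = 1) ∨ 3 ≤ seg then seg else 0
      else 0

-- the triple loop over start cells and directions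
def Afold (g : Int → Int → Int) (n m : Int) (fuel : Nat) : Int :=
  (PySem.List.pyRange 0 n 1).foldl (fun acc i =>
    (PySem.List.pyRange 0 m 1).foldl (fun acc j =>
      if g i j ≠ 1 then acc
      else [((1:Int),(1:Int)), (1,-1), (-1,1), (-1,-1)].foldl
        (fun acc d => max acc (walkA g n m d.1 d.2 fuel i j 1)) acc) acc) 0

def solution (matrix : List (List Int)) : Int :=
  if matrix.length = 0 then 0
  else if (matrix.headD []).length = 0 then 0
  else
    Afold (pvGet matrix) matrix.length (matrix.headD []).length
      (((matrix.length : Int) + ((matrix.headD []).length : Int)).toNat + 1)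

-- ===== PORT B =====
-- B's inner while loop: walk one diagonal from its border-exit cell inward against (dx,dy),
-- carrying thetwo suffix-run lengths s2/s0 (none = no valid run) and the running best.
def walkB (g : Int → Int → Int) (n m dx dy : Int) :
    Nat → Int → Int → Option Int → Option Int → Int → Int
  | 0, _, _, _, _, best => best
  | fuel+1, i, j, s2, s0, best =>
    if pvInb n m i j then
      let v := g i j
      let best' :=
        match s2 with
        | some k => if v = 1 then (if 3 ≤ k + 1 ∨ (n = 1 ∧ m = 1) then max best (k+1) else best) else best
        | none => best
      let ns2 := if v = 2 then s0.map (· + 1) else none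
      let ns0 := if v = 0 then s2.map (· + 1) else none
      walkB g n m dx dy fuel (i - dx) (j - dy) ns2 ns0 best'
    else best

-- the loop over directions and border-exit cells
def Bfold (g : Int → Int → Int) (n m : Int) (fuel : Nat) : Int :=
  [((1:Int),(1:Int)), (1,-1), (-1,1), (-1,-1)].foldl (fun best d =>
    (PySem.List.pyRange 0 n 1).foldl (fun best bi =>
      (PySem.List.pyRange 0 m 1).foldl (fun best bj =>
        if pvInb n m (bi + d.1) (bj + d.2) then best
        else walkB g n m d.1 d.2 fuel bi bj (some 0) (some 0) best) best) best) 0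

def solution_alt (matrix : List (List Int)) : Int :=
  if matrix.length = 0 then 0
  else if (matrix.headD []).length = 0 then 0
  else
    Bfold (pvGet matrix) matrix.length (matrix.headD []).length
      (((matrix.length : Int) + ((matrix.headD []).length : Int)).toNat + 1)

-- ===== PRECONDITION & SPEC =====
-- Pre_ excludes exactly the ragged matrices (some row shorter than the first row),
-- on which the Python A raises IndexError.
def Pre_solution (matrix : List (List Int)) : Prop :=
  ∀ row ∈ matrix, (matrix.headD []).length ≤ row.length
instance (matrix : List (List Int)) : Decidable (Pre_solution matrix) := by
  unfold Pre_solution; infer_instance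

def pvWitness_solution : List (List Int) := [[1, 2, 0], [2, 0, 2], [0, 2, 0]]

def Spec_solution (matrix : List (List Int)) (out : Int) : Prop := out = solution_alt matrix
instance (matrix : List (List Int)) (out : Int) : Decidable (Spec_solution matrix out) := by
  unfold Spec_solution; infer_instance

-- ===== CLAIM (what is proved, stated in full; the proofs are below) =====
def Claim_equal_solution : Prop :=
  ∀ (matrix : List (List Int)), Dom_solution matrix → Pre_solution matrix →
    Spec_solution matrix (solution matrix)

-- ===== LEMMAS AND PROOFS =====

-- direction component as an Int
def dxI (p : Bool) : Int := if p then 1 else -1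

-- steps remaining until leaving [0,n) from i moving in direction p (≥ 1 while in bounds)
def measA (p : Bool) (n i : Int) : Nat := (if p then n - i else i + 1).toNat

-- the valid alternating run length from (i,j) to the border (none = mismatch before the border)
def tail (g : Int → Int → Int) (n m : Int) (px py : Bool) (e i j : Int) : Option Int :=
  if h : 0 ≤ i ∧ i < n ∧ 0 ≤ j ∧ j < m then
    if g i j = e then (tail g n m px py (2 - e) (i + dxI px) (j + dxI py)).map (· + 1)
    else none
  else some 0
termination_by measA px n i + measA py m j
decreasing_by
  cases px <;> cases py <;> simp [measA, dxI] <;> omega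

-- the contribution of a start cell (value of A's accepted segment through it, else 0)
def cVal (g : Int → Int → Int) (n m : Int) (px py : Bool) (i j : Int) : Int :=
  if g i j = 1 then
    match tail g n m px py 2 (i + dxI px) (j + dxI py) with
    | some k => if 3 ≤ k + 1 ∨ (n = 1 ∧ m = 1) then k + 1 else 0
    | none => 0
  else 0

-- max of the contributions on the ray going inward (against the direction) from (i,j)
def rayMax (g : Int → Int → Int) (n m : Int) (px py : Bool) (i j : Int) : Int :=
  if h : 0 ≤ i ∧ i < n ∧ 0 ≤ j ∧ j < m then
    max (cVal g n m px py i j) (rayMax g n m px py (i - dxI px) (j - dxI py))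
  else 0
termination_by measA (!px) n i + measA (!py) m j
decreasing_by
  cases px <;> cases py <;> simp [measA, dxI] <;> omega


-- ---- generic foldl lemmas over Int accumulators ----

theorem pvFoldl_pred {alpha : Type} (P : Int → Prop) (h : Int → alpha → Int) (xs : List alpha)
    (acc : Int) (hacc : P acc) (hstep : ∀ a x, x ∈ xs → P a → P (h a x)) :
    P (xs.foldl h acc) := by
  induction xs generalizing acc with
  | nil => exact hacc
  | cons y ys ih =>
    exact ih (h acc y) (hstep acc y (by simp) hacc)
      (fun a x hx ha => hstep a x (by simp [hx]) ha)

theorem pvFoldl_ge_acc {alpha : Type} (P : Int → Prop) (h : Int → alpha → Int) (xs : List alpha)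
    (hpres : ∀ a x, P a → P (h a x)) (hmono : ∀ a x, P a → a ≤ h a x) :
    ∀ acc : Int, P acc → acc ≤ xs.foldl h acc := by
  induction xs with
  | nil => simp
  | cons y ys ih =>
    intro acc hacc
    have h1 : acc ≤ h acc y := hmono acc y hacc
    have h2 := ih (h acc y) (hpres acc y hacc)
    simpa using le_trans h1 h2

theorem pvLe_foldl_of_mem {alpha : Type} (P : Int → Prop) (h : Int → alpha → Int) (xs : List alpha)
    (v : Int) (x : alpha)
    (hpres : ∀ a y, P a → P (h a y))
    (hmono : ∀ a y, P a → a ≤ h a y)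
    (hv : ∀ a, P a → v ≤ h a x) :
    ∀ acc : Int, x ∈ xs → P acc → v ≤ xs.foldl h acc := by
  induction xs with
  | nil => intro acc hx; cases hx
  | cons y ys ih =>
    intro acc hx hacc
    rcases List.mem_cons.mp hx with rfl | hx'
    · have h1 : v ≤ h acc x := hv acc hacc
      have h2 : h acc x ≤ ys.foldl h (h acc x) :=
        pvFoldl_ge_acc P h ys hpres hmono (h acc x) (hpres acc x hacc)
      simpa using le_trans h1 h2
    · exact ih (h acc y) hx' (hpres acc y hacc)

-- ---- measure facts ----

theorem measA_pos (p : Bool) {n i : Int} (h0 : 0 ≤ i) (h1 : i < n) : 1 ≤ measA p n i := by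
  cases p <;> simp [measA] <;> omega

theorem measA_le (p : Bool) {n i : Int} (h0 : 0 ≤ i) (h1 : i < n) : measA p n i ≤ n.toNat := by
  cases p <;> simp [measA] <;> omega

theorem measA_step (p : Bool) {n i : Int} (h0 : 0 ≤ i) (h1 : i < n) :
    measA p n (i + dxI p) + 1 = measA p n i := by
  cases p <;> simp [measA, dxI] <;> omega

theorem measA_step_back (p : Bool) {n i : Int} (h0 : 0 ≤ i) (h1 : i < n) :
    measA (!p) n (i - dxI p) + 1 = measA (!p) n i := by
  cases p <;> simp [measA, dxI] <;> omega

-- ---- tail / cVal / rayMax basics ----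

theorem tail_oob (g : Int → Int → Int) (n m : Int) (px py : Bool) (e i j : Int)
    (h : ¬ (0 ≤ i ∧ i < n ∧ 0 ≤ j ∧ j < m)) : tail g n m px py e i j = some 0 := by
  rw [tail]; simp [h]

theorem tail_inb (g : Int → Int → Int) (n m : Int) (px py : Bool) (e i j : Int)
    (h : 0 ≤ i ∧ i < n ∧ 0 ≤ j ∧ j < m) :
    tail g n m px py e i j =
      (if g i j = e then (tail g n m px py (2 - e) (i + dxI px) (j + dxI py)).map (· + 1)
       else none) := by
  rw [tail]; simp [h]

theorem tail_nonneg (g : Int → Int → Int) (n m : Int) (px py : Bool) :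
    ∀ (fuel : Nat) (e i j k : Int), measA px n i + measA py m j ≤ fuel →
      tail g n m px py e i j = some k → 0 ≤ k := by
  intro fuel
  induction fuel with
  | zero =>
    intro e i j k hf ht
    by_cases h : 0 ≤ i ∧ i < n ∧ 0 ≤ j ∧ j < m
    · have := measA_pos px h.1 h.2.1
      have := measA_pos py h.2.2.1 h.2.2.2
      omega
    · rw [tail_oob g n m px py e i j h] at ht
      simp at ht
      omega
  | succ f ih =>
    intro e i j k hf ht
    by_cases h : 0 ≤ i ∧ i < n ∧ 0 ≤ j ∧ j < m
    · rw [tail_inb g n m px py e i j h] at ht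
      by_cases hg : g i j = e
      · rw [if_pos hg] at ht
        rcases hrec : tail g n m px py (2 - e) (i + dxI px) (j + dxI py) with _ | k'
        · rw [hrec] at ht; simp at ht
        · rw [hrec] at ht
          simp at ht
          have hm1 := measA_step px h.1 h.2.1
          have hm2 := measA_step py h.2.2.1 h.2.2.2
          have := ih (2 - e) (i + dxI px) (j + dxI py) k' (by omega) hrec
          omega
      · rw [if_neg hg] at ht; simp at ht
    · rw [tail_oob g n m px py e i j h] at ht
      simp at ht
      omega

theorem cVal_nonneg (g : Int → Int → Int) (n m : Int) (px py : Bool) (i j : Int) :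
    0 ≤ cVal g n m px py i j := by
  unfold cVal
  by_cases hg : g i j = 1
  · rw [if_pos hg]
    rcases ht : tail g n m px py 2 (i + dxI px) (j + dxI py) with _ | k
    · simp
    · have hk := tail_nonneg g n m px py
        (measA px n (i + dxI px) + measA py m (j + dxI py)) 2 _ _ k le_rfl ht
      simp only []
      split <;> omega
  · rw [if_neg hg]

theorem rayMax_nonneg (g : Int → Int → Int) (n m : Int) (px py : Bool) :
    ∀ (i j : Int), 0 ≤ rayMax g n m px py i j := by
  have key : ∀ (fuel : Nat) (i j : Int), measA (!px) n i + measA (!py) m j ≤ fuel →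
      0 ≤ rayMax g n m px py i j := by
    intro fuel
    induction fuel with
    | zero =>
      intro i j hf
      by_cases h : 0 ≤ i ∧ i < n ∧ 0 ≤ j ∧ j < m
      · have := measA_pos (!px) h.1 h.2.1
        have := measA_pos (!py) h.2.2.1 h.2.2.2
        omega
      · rw [rayMax]; simp [h]
    | succ f ih =>
      intro i j hf
      by_cases h : 0 ≤ i ∧ i < n ∧ 0 ≤ j ∧ j < m
      · rw [rayMax]
        rw [dif_pos h]
        have hm1 := measA_step_back px h.1 h.2.1
        have hm2 := measA_step_back py h.2.2.1 h.2.2.2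
        have hr := ih (i - dxI px) (j - dxI py) (by omega)
        have hc := cVal_nonneg g n m px py i j
        omega
      · rw [rayMax]; simp [h]
  intro i j
  exact key (measA (!px) n i + measA (!py) m j) i j le_rfl

theorem rayMax_le (g : Int → Int → Int) (n m : Int) (px py : Bool) (M : Int)
    (hM : 0 ≤ M)
    (hc : ∀ i j : Int, 0 ≤ i → i < n → 0 ≤ j → j < m → cVal g n m px py i j ≤ M) :
    ∀ (i j : Int), rayMax g n m px py i j ≤ M := by
  have key : ∀ (fuel : Nat) (i j : Int), measA (!px) n i + measA (!py) m j ≤ fuel →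
      rayMax g n m px py i j ≤ M := by
    intro fuel
    induction fuel with
    | zero =>
      intro i j hf
      by_cases h : 0 ≤ i ∧ i < n ∧ 0 ≤ j ∧ j < m
      · have := measA_pos (!px) h.1 h.2.1
        have := measA_pos (!py) h.2.2.1 h.2.2.2
        omega
      · rw [rayMax]; simp [h]; exact hM
    | succ f ih =>
      intro i j hf
      by_cases h : 0 ≤ i ∧ i < n ∧ 0 ≤ j ∧ j < m
      · rw [rayMax, dif_pos h]
        have hm1 := measA_step_back px h.1 h.2.1
        have hm2 := measA_step_back py h.2.2.1 h.2.2.2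
        have hr := ih (i - dxI px) (j - dxI py) (by omega)
        have hc := hc i j h.1 h.2.1 h.2.2.1 h.2.2.2
        omega
      · rw [rayMax]; simp [h]; exact hM
  intro i j
  exact key (measA (!px) n i + measA (!py) m j) i j le_rfl

theorem ray_cover (g : Int → Int → Int) (n m : Int) (px py : Bool) :
    ∀ (k : Nat) (i j : Int), (0 ≤ i ∧ i < n ∧ 0 ≤ j ∧ j < m) →
      (0 ≤ i + k * dxI px ∧ i + k * dxI px < n ∧ 0 ≤ j + k * dxI py ∧ j + k * dxI py < m) →
      cVal g n m px py i j ≤ rayMax g n m px py (i + k * dxI px) (j + k * dxI py) := by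
  intro k
  induction k with
  | zero =>
    intro i j h _
    simp only [Nat.cast_zero, zero_mul, add_zero]
    rw [rayMax, dif_pos h]
    exact le_max_left _ _
  | succ k ih =>
    intro i j h he
    have hmid : 0 ≤ i + k * dxI px ∧ i + k * dxI px < n ∧
        0 ≤ j + k * dxI py ∧ j + k * dxI py < m := by
      cases px <;> cases py <;> simp [dxI] at he ⊢ <;> push_cast at he ⊢ <;> omega
    have hstep1 : i + ((k : Nat) + 1 : Nat) * dxI px - dxI px = i + k * dxI px := by
      push_cast; ring
    have hstep2 : j + ((k : Nat) + 1 : Nat) * dxI py - dxI py = j + k * dxI py := by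
      push_cast; ring
    rw [rayMax, dif_pos he, hstep1, hstep2]
    exact le_trans (ih i j h hmid) (le_max_right _ _)

theorem border_exists (px py : Bool) {n m i j : Int}
    (h : 0 ≤ i ∧ i < n ∧ 0 ≤ j ∧ j < m) :
    ∃ k : Nat, (0 ≤ i + k * dxI px ∧ i + k * dxI px < n ∧ 0 ≤ j + k * dxI py ∧ j + k * dxI py < m) ∧
      ¬ (0 ≤ i + k * dxI px + dxI px ∧ i + k * dxI px + dxI px < n ∧
         0 ≤ j + k * dxI py + dxI py ∧ j + k * dxI py + dxI py < m) := by
  have ha : 0 ≤ (if px then n - 1 - i else i) := by cases px <;> simp [dxI] <;> omega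
  have hb : 0 ≤ (if py then m - 1 - j else j) := by cases py <;> simp [dxI] <;> omega
  refine ⟨(min (if px then n - 1 - i else i) (if py then m - 1 - j else j)).toNat, ?_, ?_⟩ <;>
    cases px <;> cases py <;> simp [dxI] at * <;> push_cast <;> omega

-- ---- the two walk characterisations ----

theorem walkA_eq (g : Int → Int → Int) (n m : Int) (px py : Bool) :
    ∀ (fuel : Nat) (i j seg e : Int),
      measA px n i + measA py m j ≤ fuel →
      (0 ≤ i ∧ i < n ∧ 0 ≤ j ∧ j < m) → 1 ≤ seg →
      e = (if seg % 2 = 1 then 2 else 0) →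
      walkA g n m (dxI px) (dxI py) fuel i j seg =
        (match tail g n m px py e (i + dxI px) (j + dxI py) with
         | some k => if (n = 1 ∧ m = 1) ∨ 3 ≤ seg + k then seg + k else 0
         | none => 0) := by
  intro fuel
  induction fuel with
  | zero =>
    intro i j seg e hf h hseg he
    exfalso
    have := measA_pos px h.1 h.2.1
    have := measA_pos py h.2.2.1 h.2.2.2
    omega
  | succ f ih =>
    intro i j seg e hf h hseg he
    rw [walkA]
    have hev : evA seg = e := by
      rw [evA, if_neg (by omega : ¬ seg = 0), he]
    by_cases hnb : 0 ≤ i + dxI px ∧ i + dxI px < n ∧ 0 ≤ j + dxI py ∧ j + dxI py < m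
    · rw [if_pos (by simp [pvInb]; tauto)]
      rw [tail_inb g n m px py e _ _ hnb]
      by_cases hg : g (i + dxI px) (j + dxI py) = e
      · rw [if_neg (by rw [hev]; simpa using hg), if_pos hg]
        have hm1 := measA_step px h.1 h.2.1
        have hm2 := measA_step py h.2.2.1 h.2.2.2
        have he' : 2 - e = (if (seg + 1) % 2 = 1 then 2 else 0) := by
          have h2 : seg % 2 = 0 ∨ seg % 2 = 1 := by omega
          rcases h2 with h2 | h2
          · rw [if_neg (by omega : ¬ seg % 2 = 1)] at he
            rw [if_pos (by omega : (seg + 1) % 2 = 1)]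
            omega
          · rw [if_pos h2] at he
            rw [if_neg (by omega : ¬ (seg + 1) % 2 = 1)]
            omega
        rw [ih (i + dxI px) (j + dxI py) (seg + 1) (2 - e) (by omega) hnb (by omega) he']
        rcases hres : tail g n m px py (2 - e) (i + dxI px + dxI px) (j + dxI py + dxI py)
          with _ | k
        · simp
        · simp only [Option.map_some]
          have : seg + 1 + k = seg + (k + 1) := by ring
          rw [this]
      · rw [if_pos (by rw [hev]; simpa using hg), if_neg hg]
    · rw [if_neg (by simp [pvInb]; intro h1 h2 h3; by_contra hc; exact hnb ⟨h1, h2, h3, by omega⟩)]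
      rw [tail_oob g n m px py e _ _ hnb]
      have hbord : i = 0 ∨ i = n - 1 ∨ j = 0 ∨ j = m - 1 := by
        cases px <;> cases py <;> simp [dxI] at hnb <;> omega
      rw [if_pos hbord]
      simp

theorem walkB_eq (g : Int → Int → Int) (n m : Int) (px py : Bool) (hn : 1 ≤ n) (hm : 1 ≤ m) :
    ∀ (fuel : Nat) (i j best : Int),
      measA (!px) n i + measA (!py) m j ≤ fuel → 0 ≤ best →
      walkB g n m (dxI px) (dxI py) fuel i j
          (tail g n m px py 2 (i + dxI px) (j + dxI py))
          (tail g n m px py 0 (i + dxI px) (j + dxI py)) best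
        = max best (rayMax g n m px py i j) := by
  intro fuel
  induction fuel with
  | zero =>
    intro i j best hf hb
    by_cases h : 0 ≤ i ∧ i < n ∧ 0 ≤ j ∧ j < m
    · exfalso
      have := measA_pos (!px) h.1 h.2.1
      have := measA_pos (!py) h.2.2.1 h.2.2.2
      omega
    · rw [walkB, rayMax, dif_neg h]
      omega
  | succ f ih =>
    intro i j best hf hb
    rw [walkB]
    by_cases h : 0 ≤ i ∧ i < n ∧ 0 ≤ j ∧ j < m
    · rw [if_pos (by simp [pvInb]; tauto)]
      simp only []
      have hm1 := measA_step_back px h.1 h.2.1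
      have hm2 := measA_step_back py h.2.2.1 h.2.2.2
      have hback1 : i - dxI px + dxI px = i := by ring
      have hback2 : j - dxI py + dxI py = j := by ring
      have hray : rayMax g n m px py i j
          = max (cVal g n m px py i j) (rayMax g n m px py (i - dxI px) (j - dxI py)) := by
        rw [rayMax, dif_pos h]
      have hrnn := rayMax_nonneg g n m px py (i - dxI px) (j - dxI py)
      have hns2 : (if g i j = 2
            then (tail g n m px py 0 (i + dxI px) (j + dxI py)).map (· + 1) else none)
          = tail g n m px py 2 (i - dxI px + dxI px) (j - dxI py + dxI py) := by
        rw [hback1, hback2, tail_inb g n m px py 2 i j h]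
        norm_num
      have hns0 : (if g i j = 0
            then (tail g n m px py 2 (i + dxI px) (j + dxI py)).map (· + 1) else none)
          = tail g n m px py 0 (i - dxI px + dxI px) (j - dxI py + dxI py) := by
        rw [hback1, hback2, tail_inb g n m px py 0 i j h]
        norm_num
      rw [hns0, hns2]
      rcases ht2 : tail g n m px py 2 (i + dxI px) (j + dxI py) with _ | k
      · simp only []
        rw [ih (i - dxI px) (j - dxI py) best (by omega) hb, hray]
        have hcv : cVal g n m px py i j = 0 := by
          unfold cVal
          rw [ht2]
          simp
        rw [hcv]
        omega
      · simp only []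
        have hknn := tail_nonneg g n m px py
          (measA px n (i + dxI px) + measA py m (j + dxI py)) 2 _ _ k le_rfl ht2
        by_cases hg : g i j = 1
        · rw [if_pos hg]
          by_cases hacc : 3 ≤ k + 1 ∨ (n = 1 ∧ m = 1)
          · rw [if_pos hacc]
            rw [ih (i - dxI px) (j - dxI py) (max best (k + 1)) (by omega) (by omega), hray]
            have hcv : cVal g n m px py i j = k + 1 := by
              unfold cVal
              rw [if_pos hg, ht2]
              simp only []
              rw [if_pos hacc]
            rw [hcv]
            omega
          · rw [if_neg hacc]
            rw [ih (i - dxI px) (j - dxI py) best (by omega) hb, hray]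
            have hcv : cVal g n m px py i j = 0 := by
              unfold cVal
              rw [if_pos hg, ht2]
              simp only []
              rw [if_neg hacc]
            rw [hcv]
            omega
        · rw [if_neg hg]
          rw [ih (i - dxI px) (j - dxI py) best (by omega) hb, hray]
          have hcv : cVal g n m px py i j = 0 := by
            unfold cVal
            rw [if_neg hg]
          rw [hcv]
          omega
    · rw [if_neg (by simp [pvInb]; intro h1 h2 h3; by_contra hc; exact h ⟨h1, h2, h3, by omega⟩)]
      rw [rayMax, dif_neg h]
      omega

theorem walkB_ge_best (g : Int → Int → Int) (n m dx dy : Int) :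
    ∀ (fuel : Nat) (i j : Int) (s2 s0 : Option Int) (best : Int),
      best ≤ walkB g n m dx dy fuel i j s2 s0 best := by
  intro fuel
  induction fuel with
  | zero => intro i j s2 s0 best; simp [walkB]
  | succ f ih =>
    intro i j s2 s0 best
    rw [walkB]
    split
    · refine le_trans ?_ (ih _ _ _ _ _)
      rcases s2 with _ | k
      · simp
      · simp only []
        split
        · split <;> simp
        · simp
    · exact le_rfl


theorem fuel_ok (p q : Bool) {n m i j : Int} (h1 : 0 ≤ i) (h2 : i < n) (h3 : 0 ≤ j)
    (h4 : j < m) : measA p n i + measA q m j ≤ (n + m).toNat + 1 := by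
  have := measA_le p h1 h2
  have := measA_le q h3 h4
  omega

theorem walkA_cVal (g : Int → Int → Int) (n m : Int) (px py : Bool) {i j : Int}
    (h : 0 ≤ i ∧ i < n ∧ 0 ≤ j ∧ j < m) (hg : g i j = 1) :
    walkA g n m (dxI px) (dxI py) ((n + m).toNat + 1) i j 1 = cVal g n m px py i j := by
  rw [walkA_eq g n m px py ((n + m).toNat + 1) i j 1 2
      (fuel_ok px py h.1 h.2.1 h.2.2.1 h.2.2.2) h (by norm_num) (by norm_num)]
  unfold cVal
  rw [if_pos hg]
  rcases ht : tail g n m px py 2 (i + dxI px) (j + dxI py) with _ | k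
  · rfl
  · simp only []
    have hor : ((n = 1 ∧ m = 1) ∨ 3 ≤ 1 + k) ↔ (3 ≤ k + 1 ∨ (n = 1 ∧ m = 1)) := by
      constructor
      · rintro (hA | hB)
        · exact Or.inr hA
        · exact Or.inl (by omega)
      · rintro (hB | hA)
        · exact Or.inr (by omega)
        · exact Or.inl hA
    rw [if_congr hor (show (1:ℤ) + k = k + 1 by ring) rfl]

theorem walkB_border (g : Int → Int → Int) (n m : Int) (px py : Bool) (hn : 1 ≤ n)
    (hm : 1 ≤ m) {bi bj : Int} (h : 0 ≤ bi ∧ bi < n ∧ 0 ≤ bj ∧ bj < m)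
    (hout : ¬ (0 ≤ bi + dxI px ∧ bi + dxI px < n ∧ 0 ≤ bj + dxI py ∧ bj + dxI py < m))
    {a : Int} (ha : 0 ≤ a) :
    walkB g n m (dxI px) (dxI py) ((n + m).toNat + 1) bi bj (some 0) (some 0) a
      = max a (rayMax g n m px py bi bj) := by
  have hw := walkB_eq g n m px py hn hm ((n + m).toNat + 1) bi bj a
    (fuel_ok (!px) (!py) h.1 h.2.1 h.2.2.1 h.2.2.2) ha
  rw [tail_oob g n m px py 2 _ _ hout, tail_oob g n m px py 0 _ _ hout] at hw
  exact hw

theorem Afold_nonneg (g : Int → Int → Int) (n m : Int) (fuel : Nat) :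
    0 ≤ Afold g n m fuel := by
  unfold Afold
  refine pvFoldl_pred (fun a => 0 ≤ a) _ _ _ le_rfl (fun a i _ ha => ?_)
  refine pvFoldl_pred (fun a => 0 ≤ a) _ _ _ ha (fun a j _ ha => ?_)
  split
  · exact ha
  · refine pvFoldl_pred (fun a => 0 ≤ a) _ _ _ ha (fun a d _ ha => ?_)
    exact le_trans ha (le_max_left _ _)

theorem Bfold_nonneg (g : Int → Int → Int) (n m : Int) (fuel : Nat) :
    0 ≤ Bfold g n m fuel := by
  unfold Bfold
  refine pvFoldl_pred (fun a => 0 ≤ a) _ _ _ le_rfl (fun a d _ ha => ?_)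
  refine pvFoldl_pred (fun a => 0 ≤ a) _ _ _ ha (fun a bi _ ha => ?_)
  refine pvFoldl_pred (fun a => 0 ≤ a) _ _ _ ha (fun a bj _ ha => ?_)
  split
  · exact ha
  · exact le_trans ha (walkB_ge_best g n m d.1 d.2 fuel bi bj _ _ a)

theorem dirs_mem (px py : Bool) :
    (dxI px, dxI py) ∈ [((1:Int),(1:Int)), (1,-1), (-1,1), (-1,-1)] := by
  cases px <;> cases py <;> simp [dxI]

theorem dirs_cases {d : Int × Int}
    (hd : d ∈ [((1:Int),(1:Int)), (1,-1), (-1,1), (-1,-1)]) :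
    ∃ px py : Bool, d = (dxI px, dxI py) := by
  fin_cases hd
  · exact ⟨true, true, rfl⟩
  · exact ⟨true, false, rfl⟩
  · exact ⟨false, true, rfl⟩
  · exact ⟨false, false, rfl⟩

theorem Afold_le_Bfold (g : Int → Int → Int) (n m : Int) (hn : 1 ≤ n) (hm : 1 ≤ m) :
    Afold g n m ((n + m).toNat + 1) ≤ Bfold g n m ((n + m).toNat + 1) := by
  -- every start-cell contribution is found on its diagonal's inward sweep
  have hkey : ∀ (px py : Bool) (i j : Int), (0 ≤ i ∧ i < n ∧ 0 ≤ j ∧ j < m) →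
      cVal g n m px py i j ≤ Bfold g n m ((n + m).toNat + 1) := by
    intro px py i j h
    obtain ⟨k, hbk, hout⟩ := border_exists px py h
    have h1 : cVal g n m px py i j ≤
        rayMax g n m px py (i + k * dxI px) (j + k * dxI py) :=
      ray_cover g n m px py k i j h hbk
    refine le_trans h1 ?_
    unfold Bfold
    refine pvLe_foldl_of_mem (fun a => 0 ≤ a) _ _ _ (dxI px, dxI py)
      (fun a d ha => ?pres) (fun a d ha => ?mono) (fun a ha => ?hv) 0 (dirs_mem px py) le_rfl
    case pres =>
      refine pvFoldl_pred (fun a => 0 ≤ a) _ _ _ ha (fun a bi _ ha => ?_)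
      refine pvFoldl_pred (fun a => 0 ≤ a) _ _ _ ha (fun a bj _ ha => ?_)
      split
      · exact ha
      · exact le_trans ha (walkB_ge_best g n m d.1 d.2 _ bi bj _ _ a)
    case mono =>
      refine pvFoldl_ge_acc (fun a => 0 ≤ a) _ _ (fun a bi ha => ?_) (fun a bi ha => ?_) a ha
      · refine pvFoldl_pred (fun a => 0 ≤ a) _ _ _ ha (fun a bj _ ha => ?_)
        split
        · exact ha
        · exact le_trans ha (walkB_ge_best g n m d.1 d.2 _ bi bj _ _ a)
      · refine pvFoldl_ge_acc (fun a => 0 ≤ a) _ _ (fun a bj ha => ?_) (fun a bj ha => ?_) a ha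
        · split
          · exact ha
          · exact le_trans ha (walkB_ge_best g n m d.1 d.2 _ bi bj _ _ a)
        · split
          · exact le_rfl
          · exact walkB_ge_best g n m d.1 d.2 _ bi bj _ _ a
    case hv =>
      refine pvLe_foldl_of_mem (fun a => 0 ≤ a) _ _ _ (i + k * dxI px)
        (fun a bi ha => ?pres2) (fun a bi ha => ?mono2) (fun a ha => ?hv2) a
        (PySem.List.mem_pyRange_one.mpr ⟨hbk.1, hbk.2.1⟩) ha
      case pres2 =>
        refine pvFoldl_pred (fun a => 0 ≤ a) _ _ _ ha (fun a bj _ ha => ?_)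
        split
        · exact ha
        · exact le_trans ha (walkB_ge_best g n m (dxI px) (dxI py) _ bi bj _ _ a)
      case mono2 =>
        refine pvFoldl_ge_acc (fun a => 0 ≤ a) _ _ (fun a bj ha => ?_) (fun a bj ha => ?_) a ha
        · split
          · exact ha
          · exact le_trans ha (walkB_ge_best g n m (dxI px) (dxI py) _ bi bj _ _ a)
        · split
          · exact le_rfl
          · exact walkB_ge_best g n m (dxI px) (dxI py) _ bi bj _ _ a
      case hv2 =>
        refine pvLe_foldl_of_mem (fun a => 0 ≤ a) _ _ _ (j + k * dxI py)
          (fun a bj ha => ?pres3) (fun a bj ha => ?mono3) (fun a ha => ?hv3) a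
          (PySem.List.mem_pyRange_one.mpr ⟨hbk.2.2.1, hbk.2.2.2⟩) ha
        case pres3 =>
          split
          · exact ha
          · exact le_trans ha (walkB_ge_best g n m (dxI px) (dxI py) _ (i + k * dxI px) bj _ _ a)
        case mono3 =>
          split
          · exact le_rfl
          · exact walkB_ge_best g n m (dxI px) (dxI py) _ (i + k * dxI px) bj _ _ a
        case hv3 =>
          rw [if_neg (by simp only [pvInb, decide_eq_true_eq]; exact hout)]
          rw [walkB_border g n m px py hn hm hbk hout ha]
          exact le_max_right _ _
  unfold Afold
  refine pvFoldl_pred (fun a => a ≤ Bfold g n m ((n + m).toNat + 1)) _ _ _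
    (Bfold_nonneg g n m _) (fun a i hi ha => ?_)
  have hib := PySem.List.mem_pyRange_one.mp hi
  refine pvFoldl_pred (fun a => a ≤ Bfold g n m ((n + m).toNat + 1)) _ _ _ ha
    (fun a j hj ha => ?_)
  have hjb := PySem.List.mem_pyRange_one.mp hj
  split
  · exact ha
  · rename_i hg
    refine pvFoldl_pred (fun a => a ≤ Bfold g n m ((n + m).toNat + 1)) _ _ _ ha
      (fun a d hd ha => ?_)
    obtain ⟨px, py, rfl⟩ := dirs_cases hd
    have hinb : 0 ≤ i ∧ i < n ∧ 0 ≤ j ∧ j < m := ⟨hib.1, hib.2, hjb.1, hjb.2⟩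
    rw [walkA_cVal g n m px py hinb (by simpa using hg)]
    exact max_le ha (hkey px py i j hinb)

theorem Bfold_le_Afold (g : Int → Int → Int) (n m : Int) (hn : 1 ≤ n) (hm : 1 ≤ m) :
    Bfold g n m ((n + m).toNat + 1) ≤ Afold g n m ((n + m).toNat + 1) := by
  have hA0 := Afold_nonneg g n m ((n + m).toNat + 1)
  -- every contribution on a sweep is a start-cell contribution A also maxes in
  have hkeyA : ∀ (px py : Bool) (i j : Int), 0 ≤ i → i < n → 0 ≤ j → j < m →
      cVal g n m px py i j ≤ Afold g n m ((n + m).toNat + 1) := by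
    intro px py i j h1 h2 h3 h4
    have hinb : 0 ≤ i ∧ i < n ∧ 0 ≤ j ∧ j < m := ⟨h1, h2, h3, h4⟩
    by_cases hg : g i j = 1
    · unfold Afold
      refine pvLe_foldl_of_mem (fun _ => True) _ _ _ i
        (fun a i' _ => trivial) (fun a i' _ => ?mono) (fun a _ => ?hv) 0
        (PySem.List.mem_pyRange_one.mpr ⟨h1, h2⟩) trivial
      case mono =>
        refine pvFoldl_ge_acc (fun _ => True) _ _ (fun a j' _ => trivial)
          (fun a j' _ => ?_) a trivial
        split
        · exact le_rfl
        · refine pvFoldl_ge_acc (fun _ => True) _ _ (fun a d _ => trivial)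
            (fun a d _ => le_max_left _ _) a trivial
      case hv =>
        refine pvLe_foldl_of_mem (fun _ => True) _ _ _ j
          (fun a j' _ => trivial) (fun a j' _ => ?mono2) (fun a _ => ?hv2) a
          (PySem.List.mem_pyRange_one.mpr ⟨h3, h4⟩) trivial
        case mono2 =>
          split
          · exact le_rfl
          · refine pvFoldl_ge_acc (fun _ => True) _ _ (fun a d _ => trivial)
              (fun a d _ => le_max_left _ _) a trivial
        case hv2 =>
          rw [if_neg (by simpa using hg)]
          refine pvLe_foldl_of_mem (fun _ => True) _ _ _ (dxI px, dxI py)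
            (fun a d _ => trivial) (fun a d _ => le_max_left _ _) (fun a _ => ?_) a
            (dirs_mem px py) trivial
          rw [walkA_cVal g n m px py hinb hg]
          exact le_max_right _ _
    · have hcv : cVal g n m px py i j = 0 := by
        unfold cVal
        rw [if_neg hg]
      rw [hcv]
      exact hA0
  unfold Bfold
  refine (pvFoldl_pred (fun a => 0 ≤ a ∧ a ≤ Afold g n m ((n + m).toNat + 1)) _ _ _
    ⟨le_rfl, hA0⟩ (fun a d hd ha => ?_)).2
  obtain ⟨px, py, rfl⟩ := dirs_cases hd
  refine pvFoldl_pred (fun a => 0 ≤ a ∧ a ≤ Afold g n m ((n + m).toNat + 1)) _ _ _ ha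
    (fun a bi hbi ha => ?_)
  have hib := PySem.List.mem_pyRange_one.mp hbi
  refine pvFoldl_pred (fun a => 0 ≤ a ∧ a ≤ Afold g n m ((n + m).toNat + 1)) _ _ _ ha
    (fun a bj hbj ha => ?_)
  have hjb := PySem.List.mem_pyRange_one.mp hbj
  split
  · exact ha
  · rename_i hskip
    have hout : ¬ (0 ≤ bi + dxI px ∧ bi + dxI px < n ∧ 0 ≤ bj + dxI py ∧ bj + dxI py < m) := by
      simpa [pvInb] using hskip
    have hinb : 0 ≤ bi ∧ bi < n ∧ 0 ≤ bj ∧ bj < m := ⟨hib.1, hib.2, hjb.1, hjb.2⟩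
    rw [walkB_border g n m px py hn hm hinb hout ha.1]
    have hray := rayMax_le g n m px py (Afold g n m ((n + m).toNat + 1)) hA0
      (hkeyA px py) bi bj
    have hr0 := rayMax_nonneg g n m px py bi bj
    exact ⟨by omega, by omega⟩



-- ===== VERDICT =====
theorem solution_spec : Claim_equal_solution := by
  intro matrix _ _
  unfold Spec_solution solution solution_alt
  by_cases h1 : matrix.length = 0
  · simp [h1]
  · by_cases h2 : (matrix.headD []).length = 0
    · have h2' : matrix.headD [] = [] := List.length_eq_zero_iff.mp h2
      have h3 : matrix.head?.getD [] = [] := by simpa using h2'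
      simp [h1, h3]
    · rw [if_neg h1, if_neg h2, if_neg h1, if_neg h2]
      have hn : 1 ≤ (matrix.length : Int) := by exact_mod_cast Nat.one_le_iff_ne_zero.mpr h1
      have hm : 1 ≤ ((matrix.headD []).length : Int) := by exact_mod_cast Nat.one_le_iff_ne_zero.mpr h2
      exact le_antisymm (Afold_le_Bfold _ _ _ hn hm) (Bfold_le_Afold _ _ _ hn hm)
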